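-- pv_equiv track=rewrite | github.com/aqqosh/python_tasks | task_4.py | same_digits_than_n
-- ===== SOURCE A (Python) =====
-- def same_digits_than_n (digits, n):
--     s = str(n)
--     cnt = 0
--     for i in range (len(s)):
--         valid_digits_counter = 0
--         for d in digits:
--             if d < s[i]:
--                 valid_digits_counter+=1
--         cnt+= valid_digits_counter * (len(digits)**(len(s)-i-1))
--         if s[i] not in digits:
--             break
--         cnt+=1 if i==len(s)-1 else 0
--     return cnt
-- ===== SOURCE B (Python) =====
-- def same_digits_than_n(digits, n):
--     # right-to-left Horner-style fold: no break, no exponentiation, single backward pass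
--     L = len(digits)
--     total = 1
--     pw = 1
--     for ch in reversed(str(n)):
--         smaller = sum(1 for d in digits if d < ch)
--         total = smaller * pw + (total if ch in digits else 0)
--         pw *= L
--     return total
-- ===== Notes on version B (the rewrite author's own statement) =====
-- stated objective: alternative
-- what changed: A scans str(n) left-to-right with an early break, an explicit power len(digits)**(len(s)-i-1) per position and a final +1 on a full match; B makes a single right-to-left Horner-style fold that accumulates the place value by one multiplication per step and replaces the break and the final +1 by a conditional carry of the running total.
import Mathlib
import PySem

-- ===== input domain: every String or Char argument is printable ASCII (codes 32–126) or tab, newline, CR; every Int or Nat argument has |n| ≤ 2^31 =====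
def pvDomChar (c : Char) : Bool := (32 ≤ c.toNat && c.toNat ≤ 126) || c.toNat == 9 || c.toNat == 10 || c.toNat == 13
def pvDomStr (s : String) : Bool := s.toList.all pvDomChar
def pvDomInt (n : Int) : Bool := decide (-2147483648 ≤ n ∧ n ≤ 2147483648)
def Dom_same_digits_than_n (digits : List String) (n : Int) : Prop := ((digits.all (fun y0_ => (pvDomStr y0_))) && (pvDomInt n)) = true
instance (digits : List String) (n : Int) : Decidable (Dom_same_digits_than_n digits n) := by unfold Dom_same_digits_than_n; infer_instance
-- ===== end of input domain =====

-- B replaces A's forward loop (per-position count × explicit power, early break, final +1)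
-- by a single right-to-left Horner-style fold with no break and no exponentiation (objective: alternative).

-- ===== PORT A =====
-- inner 'for d in digits: if d < s[i]: valid_digits_counter += 1'
def sdnA_inner (digits : List String) (c : Char) : Int :=
  digits.foldl (fun k d => if d < String.ofList [c] then k + 1 else k) 0

-- the 'for i in range(len(s))' loop with its break, recursion over the index list
def sdnA_go (digits : List String) (cs : List Char) : List Int → Int → Int
  | [], cnt => cnt
  | i :: is, cnt =>
    if String.ofList [PySem.List.pyGetD cs i ' '] ∈ digits then
      sdnA_go digits cs is
        (cnt + sdnA_inner digits (PySem.List.pyGetD cs i ' ') * (digits.length : Int) ^ ((cs.length : Int) - i - 1).toNat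
           + (if i = (cs.length : Int) - 1 then 1 else 0))
    else
      cnt + sdnA_inner digits (PySem.List.pyGetD cs i ' ') * (digits.length : Int) ^ ((cs.length : Int) - i - 1).toNat

def same_digits_than_n (digits : List String) (n : Int) : Int :=
  let s := PySem.Int.toChars n
  sdnA_go digits s (PySem.List.pyRange 0 (s.length : Int) 1) 0

-- ===== PORT B =====
-- one fold step: total = smaller*pw + (total if ch in digits else 0); pw *= L
def sdnB_step (digits : List String) (st : Int × Int) (c : Char) : Int × Int :=
  ((digits.countP (fun d => decide (d < String.ofList [c])) : Int) * st.2 +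
     (if String.ofList [c] ∈ digits then st.1 else 0),
   st.2 * (digits.length : Int))

def same_digits_than_n_alt (digits : List String) (n : Int) : Int :=
  ((PySem.Int.toChars n).reverse.foldl (sdnB_step digits) (1, 1)).1

-- ===== PRECONDITION & SPEC =====
def Spec_same_digits_than_n (digits : List String) (n : Int) (out : Int) : Prop := out = same_digits_than_n_alt digits n
instance (digits : List String) (n : Int) (out : Int) : Decidable (Spec_same_digits_than_n digits n out) := by unfold Spec_same_digits_than_n; infer_instance

-- ===== CLAIM (what is proved, stated in full; the proofs are below) =====
def Claim_equal_same_digits_than_n : Prop := ∀ (digits : List String) (n : Int), Dom_same_digits_than_n digits n → Spec_same_digits_than_n digits n (same_digits_than_n digits n)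

-- ===== LEMMAS AND PROOFS =====

-- the common mathematical value: count of digit-tuples lexicographically ≤ the char list
def gfun (digits : List String) : List Char → Int
  | [] => 1
  | c :: t => (digits.countP (fun d => decide (d < String.ofList [c])) : Int) * (digits.length : Int) ^ t.length
      + (if String.ofList [c] ∈ digits then gfun digits t else 0)

lemma sdnB_foldr (digits : List String) (cs : List Char) :
    cs.foldr (fun c st => sdnB_step digits st c) ((1 : Int), (1 : Int))
      = (gfun digits cs, (digits.length : Int) ^ cs.length) := by
  induction cs with
  | nil => simp [gfun]
  | cons c t ih =>
    rw [List.foldr_cons, ih]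
    unfold sdnB_step
    refine Prod.ext ?_ ?_
    · simp [gfun]
    · simp [pow_succ]

lemma sdnB_eq (digits : List String) (n : Int) :
    same_digits_than_n_alt digits n = gfun digits (PySem.Int.toChars n) := by
  unfold same_digits_than_n_alt
  rw [List.foldl_reverse, sdnB_foldr]

lemma sdnA_inner_eq (digits : List String) (c : Char) :
    sdnA_inner digits c = (digits.countP (fun d => decide (d < String.ofList [c])) : Int) := by
  unfold sdnA_inner
  rw [show (fun (k : Int) d => if d < String.ofList [c] then k + 1 else k)
        = (fun acc x => if (fun d => decide (d < String.ofList [c])) x = true then acc + 1 else acc) by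
      funext k d; simp]
  rw [PySem.List.foldl_count_if]
  simp

lemma sdnA_go_eq (digits : List String) :
    ∀ (suf pre : List Char) (cnt : Int),
      sdnA_go digits (pre ++ suf) (PySem.List.pyRange (pre.length : Int) ((pre ++ suf).length : Int) 1) cnt
        = cnt + gfun digits suf - (if suf = [] then 1 else 0) := by
  intro suf
  induction suf with
  | nil =>
    intro pre cnt
    rw [PySem.List.pyRange_one_eq_nil (by simp)]
    simp [sdnA_go, gfun]
  | cons c t ih =>
    intro pre cnt
    have hlen : ((pre ++ c :: t).length : Int) = (pre.length : Int) + (t.length : Int) + 1 := by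
      simp; omega
    have hget : PySem.List.pyGetD (pre ++ c :: t) (pre.length : Int) ' ' = c := by
      rw [PySem.List.pyGetD_natCast]
      simp [List.getD]
    have hpow : (((pre ++ c :: t).length : Int) - (pre.length : Int) - 1).toNat = t.length := by
      omega
    rw [PySem.List.pyRange_one_cons (by omega)]
    simp only [sdnA_go, hget, hpow, sdnA_inner_eq]
    by_cases hmem : String.ofList [c] ∈ digits
    · rw [if_pos hmem]
      have hpre1 : (pre.length : Int) + 1 = ((pre ++ [c]).length : Int) := by simp
      have happ : pre ++ c :: t = (pre ++ [c]) ++ t := by simp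
      rw [hpre1, happ, ih (pre ++ [c])]
      by_cases ht : t = []
      · subst ht
        rw [if_pos (by simp : (pre.length : Int) = (((pre ++ [c]) ++ ([] : List Char)).length : Int) - 1)]
        simp [gfun, hmem]
        ring
      · have hne : ¬ (pre.length : Int) = (((pre ++ [c]) ++ t).length : Int) - 1 := by
          simp
          intro h
          exact absurd (List.length_eq_zero_iff.mp (by omega)) ht
        rw [if_neg hne, if_neg ht]
        simp [gfun, hmem]
        ring
    · rw [if_neg hmem]
      simp [gfun, hmem]

lemma toDigitsCore_cons_ne_nil : ∀ (f n : Nat) (c : Char) (ds : List Char),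
    Nat.toDigitsCore 10 f n (c :: ds) ≠ [] := by
  intro f
  induction f with
  | zero => intro n c ds; simp [Nat.toDigitsCore]
  | succ f ih =>
    intro n c ds
    rw [Nat.toDigitsCore]
    split
    · simp
    · exact ih _ _ _

lemma toChars_ne_nil (n : Int) : PySem.Int.toChars n ≠ [] := by
  unfold PySem.Int.toChars
  split
  · simp [Nat.toDigits]
  · simp [Nat.toDigits]
    rw [Nat.toDigitsCore]
    split
    · simp
    · exact toDigitsCore_cons_ne_nil _ _ _ _

-- ===== VERDICT (by name: the statement is the Claim_ definition above) =====
theorem same_digits_than_n_spec : Claim_equal_same_digits_than_n := by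
  intro digits n _
  unfold Spec_same_digits_than_n
  unfold same_digits_than_n
  have h := sdnA_go_eq digits (PySem.Int.toChars n) [] 0
  simp only [List.nil_append, List.length_nil, Nat.cast_zero] at h
  rw [h, if_neg (toChars_ne_nil n), sdnB_eq]
  omega
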